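-- pv_equiv track=rewrite | github.com/manipabba/Vehicle-Routing-Problem | VRP_no_constraints_genetic_algo.py | retrive_paths
-- ===== SOURCE A (Python) =====
-- def retrive_paths(gnome, N, V):
--     paths = []
--     currPath = [1]
--     pushPath = False
--     for c in gnome:
--         # new vechicle found
--         if c > N:
--             pushPath = True
--         else:
--             currPath.append(c)
--
--         if pushPath is True:
--             currPath.append(1)
--             paths.append(currPath)
--             currPath = [1]
--             pushPath = False
--
--     currPath.append(1)
--     paths.append(currPath)
--     return paths
-- ===== SOURCE B (Python) =====
-- def retrive_paths(gnome, N, V):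
--     # Index-based: record positions of separators (elements > N), then build
--     # each path directly by slicing gnome strictly between consecutive bounds.
--     cuts = [k for k, c in enumerate(gnome) if c > N]
--     bounds = [-1] + cuts + [len(gnome)]
--     return [[1] + gnome[lo + 1:hi] + [1] for lo, hi in zip(bounds, bounds[1:])]
-- ===== Notes on version B (the rewrite author's own statement) =====
-- stated objective: alternative
-- what changed: B never accumulates a current path element by element: it records the index positions of the separators (elements > N), forms the bound sequence [-1]+cuts+[len(gnome)], and builds each path directly as the depot-wrapped slice of gnome strictly between consecutive bounds, instead of A's single loop with a pushPath flag and a mutable currPath.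
import Mathlib
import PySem

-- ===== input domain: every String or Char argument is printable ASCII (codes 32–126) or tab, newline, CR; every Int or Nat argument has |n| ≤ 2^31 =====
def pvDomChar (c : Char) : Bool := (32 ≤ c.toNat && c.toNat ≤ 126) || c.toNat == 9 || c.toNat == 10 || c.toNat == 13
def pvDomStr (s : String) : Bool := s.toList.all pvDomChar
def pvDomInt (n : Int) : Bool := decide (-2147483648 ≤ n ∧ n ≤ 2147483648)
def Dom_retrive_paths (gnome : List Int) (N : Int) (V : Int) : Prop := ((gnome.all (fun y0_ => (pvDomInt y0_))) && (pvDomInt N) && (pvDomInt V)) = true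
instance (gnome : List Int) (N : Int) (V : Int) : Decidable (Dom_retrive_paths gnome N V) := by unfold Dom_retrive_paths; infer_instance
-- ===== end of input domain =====

-- B builds each path by slicing gnome between consecutive separator index positions
-- (cuts/bounds + zip), instead of A's flag-driven loop accumulating a current path (alternative).


-- ===== PORT A =====
-- loop of A: state = (paths, currPath, pushPath), branches in Python order
def retrivePathsLoopA (N : Int) (xs : List Int) (paths : List (List Int))
    (curr : List Int) (push : Bool) : List (List Int) :=
  match xs with
  | [] => paths ++ [curr ++ [1]]
  | c :: rest =>
    let push1 := if c > N then true else push
    let curr1 := if c > N then curr else curr ++ [c]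
    if push1 then retrivePathsLoopA N rest (paths ++ [curr1 ++ [1]]) [1] false
    else retrivePathsLoopA N rest paths curr1 push1

def retrive_paths (gnome : List Int) (N : Int) (V : Int) : List (List Int) :=
  retrivePathsLoopA N gnome [] [1] false

-- ===== PORT B =====
-- cuts = [k for k, c in enumerate(gnome) if c > N]
def pvCuts (gnome : List Int) (N : Int) : List Int :=
  ((PySem.List.enumerate gnome).filter (fun p => decide (p.2 > N))).map (fun p => p.1)

-- bounds = [-1] + cuts + [len(gnome)]
def pvBounds (gnome : List Int) (N : Int) : List Int :=
  -1 :: (pvCuts gnome N ++ [(gnome.length : Int)])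

-- paths = [[1] + gnome[lo+1:hi] + [1] for lo, hi in zip(bounds, bounds[1:])]
def retrive_paths_alt (gnome : List Int) (N : Int) (V : Int) : List (List Int) :=
  ((pvBounds gnome N).zip (pvBounds gnome N).tail).map
    (fun p => 1 :: (PySem.List.slice gnome (some (p.1 + 1)) (some p.2) ++ [1]))

-- ===== PRECONDITION & SPEC =====
def Spec_retrive_paths (gnome : List Int) (N : Int) (V : Int) (out : List (List Int)) : Prop := out = retrive_paths_alt gnome N V
instance (gnome : List Int) (N : Int) (V : Int) (out : List (List Int)) : Decidable (Spec_retrive_paths gnome N V out) := by unfold Spec_retrive_paths; infer_instance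

-- ===== CLAIM (what is proved, stated in full; the proofs are below) =====
def Claim_equal_retrive_paths : Prop := ∀ (gnome : List Int) (N : Int) (V : Int), Dom_retrive_paths gnome N V → Spec_retrive_paths gnome N V (retrive_paths gnome N V)

-- ===== LEMMAS AND PROOFS =====

-- findIdx? gives an in-range index whose element satisfies p, with all earlier elements failing p
theorem pvFindIdx?_spec {α : Type} (p : α → Bool) (l : List α) (i : Nat)
    (h : l.findIdx? p = some i) :
    ∃ hlt : i < l.length, p l[i] = true ∧ ∀ x ∈ l.take i, p x = false := by
  induction l generalizing i with
  | nil => simp [List.findIdx?, List.findIdx?.go] at h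
  | cons a as ih =>
    rw [List.findIdx?_cons] at h
    cases hpa : p a with
    | true =>
      simp [hpa] at h
      subst h
      exact ⟨by simp, by simpa using hpa, by simp⟩
    | false =>
      simp [hpa] at h
      obtain ⟨j, hj, rfl⟩ := h
      obtain ⟨hlt, hpj, hpre⟩ := ih j hj
      refine ⟨by simpa using Nat.succ_lt_succ hlt, by simpa using hpj, ?_⟩
      intro x hx
      rw [List.take_succ_cons] at hx
      rcases List.mem_cons.1 hx with rfl | hx
      · exact hpa
      · exact hpre x hx

-- ghost recursion: find first separator, emit wrapped prefix, recurse on suffix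
def pvAltRec (gnome : List Int) (N : Int) (V : Int) : List (List Int) :=
  match h : gnome.findIdx? (fun c => decide (c > N)) with
  | none => [1 :: (gnome ++ [1])]
  | some i => (1 :: (gnome.take i ++ [1])) :: pvAltRec (gnome.drop (i + 1)) N V
termination_by gnome.length
decreasing_by
  have hi : i < gnome.length := (pvFindIdx?_spec _ _ _ h).1
  simp [List.length_drop]; omega

-- ---- A's loop equals the ghost recursion ----

theorem altRec_no_sep (N V : Int) (curr : List Int) (hc : ∀ x ∈ curr, ¬ x > N) :
    pvAltRec curr N V = [1 :: (curr ++ [1])] := by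
  have hn : curr.findIdx? (fun c => decide (c > N)) = none := by
    rw [List.findIdx?_eq_none_iff]
    intro x hx; simpa using hc x hx
  rw [pvAltRec.eq_def]
  split
  · rfl
  · rename_i i hi
    rw [hn] at hi; exact absurd hi (by simp)

theorem altRec_first_sep (N V : Int) (curr : List Int) (c : Int) (rest : List Int)
    (hc : ∀ x ∈ curr, ¬ x > N) (hcN : c > N) :
    pvAltRec (curr ++ c :: rest) N V
      = (1 :: (curr ++ [1])) :: pvAltRec rest N V := by
  have hidx : (curr ++ c :: rest).findIdx? (fun c => decide (c > N)) = some curr.length := by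
    induction curr with
    | nil => simp [List.findIdx?_cons, hcN]
    | cons a as ih =>
      have ha : ¬ a > N := hc a (by simp)
      simp only [List.cons_append, List.findIdx?_cons, decide_eq_true_eq]
      rw [if_neg ha]
      rw [ih (fun x hx => hc x (by simp [hx]))]
      simp [Option.map_some, List.length_cons]
  have ht : (curr ++ c :: rest).take curr.length = curr := by
    simp [List.take_left']
  have hd : (curr ++ c :: rest).drop (curr.length + 1) = rest := by
    rw [List.drop_append]
    simp
  rw [pvAltRec.eq_def]
  split
  · rename_i hnone; rw [hidx] at hnone; exact absurd hnone (by simp)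
  · rename_i i hi
    rw [hidx] at hi
    have hii : i = curr.length := by injection hi.symm
    subst hii
    rw [ht, hd]

-- main invariant: A's loop with separator-free curr equals paths ++ ghost recursion on (curr ++ xs)
theorem loopA_altRec (N V : Int) (xs : List Int) : ∀ (paths : List (List Int)) (curr : List Int),
    (∀ x ∈ curr, ¬ x > N) →
    retrivePathsLoopA N xs paths (1 :: curr) false
      = paths ++ pvAltRec (curr ++ xs) N V := by
  induction xs with
  | nil =>
    intro paths curr hc
    simp [retrivePathsLoopA, altRec_no_sep N V curr hc]
  | cons c rest ih =>
    intro paths curr hc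
    simp only [retrivePathsLoopA]
    by_cases h : c > N
    · simp only [h, if_true]
      rw [ih (paths ++ [(1 :: curr) ++ [1]]) [] (by simp)]
      rw [altRec_first_sep N V curr c rest hc h]
      simp
    · simp only [h, if_false]
      have : (1 :: curr) ++ [c] = 1 :: (curr ++ [c]) := by simp
      rw [this, ih paths (curr ++ [c]) (by intro x hx; rcases List.mem_append.1 hx with h1|h1
                                           · exact hc x h1
                                           · simp at h1; omega)]
      simp

-- ---- B equals the ghost recursion ----

-- shifting the enumerate start shifts every index
theorem pvEnumerate_shift {α : Type} (l : List α) : ∀ (s : Int),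
    PySem.List.enumerate l s = (PySem.List.enumerate l 0).map (fun p => (p.1 + s, p.2)) := by
  induction l with
  | nil => intro s; simp [PySem.List.enumerate_nil]
  | cons x xs ih =>
    intro s
    rw [PySem.List.enumerate_cons, PySem.List.enumerate_cons, ih (s + 1), ih (0 + 1)]
    simp [List.map_map, Function.comp_def]
    intro a b _
    omega

theorem pvCuts_sep_free (N : Int) (l : List Int) (s : Int) (hc : ∀ x ∈ l, ¬ x > N) :
    (PySem.List.enumerate l s).filter (fun p => decide (p.2 > N)) = [] := by
  rw [List.filter_eq_nil_iff]
  intro p hp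
  obtain ⟨k, hk, rfl⟩ := (PySem.List.mem_enumerate_iff _ _ _).1 hp
  simpa using hc _ (List.getElem_mem hk)

theorem pvCuts_nonneg (gnome : List Int) (N : Int) : ∀ x ∈ pvCuts gnome N, 0 ≤ x := by
  intro x hx
  unfold pvCuts at hx
  obtain ⟨p, hp, rfl⟩ := List.mem_map.1 hx
  obtain ⟨k, hk, rfl⟩ := (PySem.List.mem_enumerate_iff _ _ _).1 (List.mem_of_mem_filter hp)
  simp

-- cuts of curr ++ c :: rest, curr separator-free, c a separator
theorem pvCuts_split (N : Int) (curr : List Int) (c : Int) (rest : List Int)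
    (hc : ∀ x ∈ curr, ¬ x > N) (hcN : c > N) :
    pvCuts (curr ++ c :: rest) N
      = (curr.length : Int) :: (pvCuts rest N).map (fun x => x + ((curr.length : Int) + 1)) := by
  unfold pvCuts
  rw [PySem.List.enumerate_append, PySem.List.enumerate_cons]
  rw [List.filter_append, pvCuts_sep_free N curr 0 hc]
  rw [List.filter_cons_of_pos (by simpa using hcN)]
  rw [pvEnumerate_shift rest ((0 : Int) + curr.length + 1)]
  rw [List.filter_map]
  simp only [List.nil_append, List.map_cons, List.map_map]
  refine List.cons_eq_cons.mpr ⟨by omega, ?_⟩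
  apply List.map_congr_left
  intro p _
  simp only [Function.comp_apply]
  omega

-- slicing after a prefix of length |pre| is slicing the suffix
theorem pvSlice_shift (pre l : List Int) (a b : Int) (ha : 0 ≤ a) (hb : 0 ≤ b) :
    PySem.List.slice (pre ++ l) (some ((pre.length : Int) + a)) (some ((pre.length : Int) + b))
      = PySem.List.slice l (some a) (some b) := by
  rw [PySem.List.slice_toNat _ (by omega) (by omega), PySem.List.slice_toNat _ ha hb]
  have h1 : ((pre.length : Int) + a).toNat = pre.length + a.toNat := by omega
  have h2 : ((pre.length : Int) + b).toNat = pre.length + b.toNat := by omega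
  have h3 : pre.length + b.toNat - (pre.length + a.toNat) = b.toNat - a.toNat := by omega
  have h4 : pre.length + a.toNat - pre.length = a.toNat := by omega
  rw [h1, h2, h3, List.drop_append, h4]
  simp [List.drop_eq_nil_of_le]

-- B on a separator-free list
theorem alt_no_sep (N V : Int) (l : List Int) (hc : ∀ x ∈ l, ¬ x > N) :
    retrive_paths_alt l N V = [1 :: (l ++ [1])] := by
  unfold retrive_paths_alt pvBounds pvCuts
  rw [pvCuts_sep_free N l 0 hc]
  simp only [List.map_nil, List.nil_append, List.tail_cons, List.zip_cons_cons,
    List.zip_nil_right, List.map_cons, List.map_nil]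
  have : (-1 : Int) + 1 = ((0 : Nat) : Int) := by norm_num
  rw [this, PySem.List.slice_toNat _ (by omega) (by omega)]
  simp

-- B on curr ++ c :: rest, curr separator-free, c a separator
theorem alt_first_sep (N V : Int) (curr : List Int) (c : Int) (rest : List Int)
    (hc : ∀ x ∈ curr, ¬ x > N) (hcN : c > N) :
    retrive_paths_alt (curr ++ c :: rest) N V
      = (1 :: (curr ++ [1])) :: retrive_paths_alt rest N V := by
  have hswrap : ((curr ++ [c]).length : Int) = (curr.length : Int) + 1 := by simp
  -- the bounds of the whole list are -1 consed onto the shifted bounds of rest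
  have hbounds : pvBounds (curr ++ c :: rest) N
      = -1 :: (pvBounds rest N).map (fun x => x + ((curr.length : Int) + 1)) := by
    unfold pvBounds
    rw [pvCuts_split N curr c rest hc hcN]
    simp
    omega
  unfold retrive_paths_alt
  rw [hbounds]
  have hne : (pvBounds rest N).map (fun x => x + ((curr.length : Int) + 1)) ≠ [] := by
    simp [pvBounds]
  obtain ⟨m0, M', hM⟩ := List.exists_cons_of_ne_nil hne
  have hm0 : m0 = (curr.length : Int) := by
    have h' := congrArg (fun l => l.head?) hM
    simp only [pvBounds, List.map_cons, List.head?_cons] at h'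
    have : m0 = -1 + ((curr.length : Int) + 1) := by simpa using h'.symm
    omega
  have hM2 : M' = ((pvBounds rest N).map (fun x => x + ((curr.length : Int) + 1))).tail := by
    rw [hM]
    rfl
  rw [hM]
  simp only [List.tail_cons, List.zip_cons_cons, List.map_cons]
  rw [← hM, hM2]
  -- head path
  have hhead : (1 : Int) :: (PySem.List.slice (curr ++ c :: rest) (some (-1 + 1)) (some m0) ++ [1])
      = 1 :: (curr ++ [1]) := by
    rw [hm0]
    have h0 : (-1 : Int) + 1 = ((0 : Nat) : Int) := by norm_num
    rw [h0, PySem.List.slice_toNat _ (by omega) (by omega)]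
    simp [List.take_left']
  rw [hhead]
  -- tail paths: zip of a mapped list reduces to the map over rest's own bound pairs
  have htail :
      (((pvBounds rest N).map (fun x => x + ((curr.length : Int) + 1))).zip
          (((pvBounds rest N).map (fun x => x + ((curr.length : Int) + 1))).tail)).map
          (fun p => (1 : Int) :: (PySem.List.slice (curr ++ c :: rest) (some (p.1 + 1)) (some p.2) ++ [1]))
        = (((pvBounds rest N)).zip ((pvBounds rest N)).tail).map
            (fun p => (1 : Int) :: (PySem.List.slice rest (some (p.1 + 1)) (some p.2) ++ [1])) := by
    rw [← List.map_tail, List.zip_map, List.map_map]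
    apply List.map_congr_left
    intro p hp
    obtain ⟨x, y⟩ := p
    have hmem := List.of_mem_zip hp
    have hx1 : -1 ≤ x := by
      rcases List.mem_cons.1 hmem.1 with h | h
      · omega
      · rcases List.mem_append.1 h with h | h
        · have := pvCuts_nonneg rest N _ h; omega
        · simp at h; omega
    have hy1 : 0 ≤ y := by
      have : y ∈ pvCuts rest N ++ [(rest.length : Int)] := by
        simpa [pvBounds] using hmem.2
      rcases List.mem_append.1 this with h | h
      · exact pvCuts_nonneg rest N _ h
      · simp at h; omega
    simp only [Function.comp_apply, Prod.map_apply]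
    have hassoc : curr ++ c :: rest = (curr ++ [c]) ++ rest := by simp
    have e1 : x + ((curr.length : Int) + 1) + 1 = (((curr ++ [c]).length : Int)) + (x + 1) := by
      rw [hswrap]; omega
    have e2 : y + ((curr.length : Int) + 1) = (((curr ++ [c]).length : Int)) + y := by
      rw [hswrap]; omega
    rw [hassoc, e1, e2, pvSlice_shift (curr ++ [c]) rest (x + 1) y (by omega) hy1]
  rw [htail]

-- B equals the ghost recursion (well-founded on the list length)
theorem alt_eq_altRec (gnome : List Int) (N V : Int) :
    retrive_paths_alt gnome N V = pvAltRec gnome N V := by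
  cases h : gnome.findIdx? (fun c => decide (c > N)) with
  | none =>
    have hc : ∀ x ∈ gnome, ¬ x > N := by
      intro x hx
      have := List.findIdx?_eq_none_iff.1 h x hx
      simpa using this
    rw [alt_no_sep N V gnome hc, altRec_no_sep N V gnome hc]
  | some i =>
    obtain ⟨hlt, hpi, hpre⟩ := pvFindIdx?_spec _ _ _ h
    have hdecomp : gnome = gnome.take i ++ gnome[i] :: gnome.drop (i + 1) := by
      conv_lhs => rw [← List.take_append_drop i gnome]
      rw [List.drop_eq_getElem_cons hlt]
    have hc : ∀ x ∈ gnome.take i, ¬ x > N := by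
      intro x hx
      simpa using hpre x hx
    have hcN : gnome[i] > N := by simpa using hpi
    have hrec := alt_eq_altRec (gnome.drop (i + 1)) N V
    conv_lhs => rw [hdecomp]
    rw [alt_first_sep N V (gnome.take i) gnome[i] (gnome.drop (i + 1)) hc hcN, hrec]
    conv_rhs => rw [hdecomp]
    rw [altRec_first_sep N V (gnome.take i) gnome[i] (gnome.drop (i + 1)) hc hcN]
termination_by gnome.length
decreasing_by
  simp [List.length_drop]; omega

-- ===== VERDICT (by name: the statement is the Claim_ definition above) =====
theorem retrive_paths_spec : Claim_equal_retrive_paths := by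
  intro gnome N V _
  unfold Spec_retrive_paths retrive_paths
  rw [alt_eq_altRec gnome N V]
  simpa using loopA_altRec N V gnome [] [] (by simp)
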